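-- pv_equiv track=rewrite | github.com/ndiekema/CPE101 | Projects/Project3/solverFuncs.py | check_rows_valid
-- ===== SOURCE A (Python) =====
-- def check_rows_valid(puzzle):
--     i = 0
--     valid = True
--
--     while i < 5:
--         if puzzle[i].count(1) > 1:
--             valid = False
--             break
--         if puzzle[i].count(2) > 1:
--             valid = False
--             break
--         if puzzle[i].count(3) > 1:
--             valid = False
--             break
--         if puzzle[i].count(4) > 1:
--             valid = False
--             break
--         if puzzle[i].count(5) > 1:
--             valid = False
--             break
--         i += 1
--
--     if valid == True:
--         return True
--     else:
--         return False
-- ===== SOURCE B (Python) =====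
-- def check_rows_valid(puzzle):
--     for i in range(5):
--         s = sorted(x for x in puzzle[i] if 1 <= x <= 5)
--         for a, b in zip(s, s[1:]):
--             if a == b:
--                 return False
--     return True
-- ===== Notes on version B (the rewrite author's own statement) =====
-- stated objective: alternative
-- what changed: Per row, B sorts the values that lie in 1..5 and scans adjacent pairs for an equal neighbour (sort-then-scan duplicate detection), instead of A's five separate list.count scans per row.
import Mathlib
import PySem

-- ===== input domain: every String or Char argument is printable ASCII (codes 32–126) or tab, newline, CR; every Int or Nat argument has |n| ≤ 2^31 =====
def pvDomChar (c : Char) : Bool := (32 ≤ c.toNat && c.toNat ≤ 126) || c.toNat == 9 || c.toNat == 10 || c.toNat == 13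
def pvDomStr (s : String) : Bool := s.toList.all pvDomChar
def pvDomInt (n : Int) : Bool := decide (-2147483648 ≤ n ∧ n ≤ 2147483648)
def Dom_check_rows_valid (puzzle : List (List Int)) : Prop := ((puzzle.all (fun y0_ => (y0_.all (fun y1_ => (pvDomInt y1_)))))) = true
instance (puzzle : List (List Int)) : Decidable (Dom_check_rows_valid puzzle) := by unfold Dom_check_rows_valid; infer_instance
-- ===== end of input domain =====

-- B detects a duplicate in a row by sorting the row's values in 1..5 and scanning adjacent pairs,
-- instead of A's five list.count scans per row (alternative algorithm; return value only).

-- ===== PORT A =====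
-- A's while loop over i = 0..4; puzzle[i] out of range is Python's IndexError (excluded by Pre_), so
-- pyGetD's `[]` default is never reached on admitted inputs.
def check_rows_valid_loop (puzzle : List (List Int)) : Nat → Nat → Bool
  | 0, _ => true
  | fuel + 1, i =>
    if i < 5 then
      let row := PySem.List.pyGetD puzzle (i : Int) []
      if PySem.List.count row 1 > 1 then false
      else if PySem.List.count row 2 > 1 then false
      else if PySem.List.count row 3 > 1 then false
      else if PySem.List.count row 4 > 1 then false
      else if PySem.List.count row 5 > 1 then false
      else check_rows_valid_loop puzzle fuel (i + 1)
    else true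

def check_rows_valid (puzzle : List (List Int)) : Bool :=
  check_rows_valid_loop puzzle 5 0

-- ===== PORT B =====
-- `for a, b in zip(s, s[1:]): if a == b: return False` — the adjacent-pair scan over the sorted row.
def adjDistinct : List Int → Bool
  | a :: b :: t => if a == b then false else adjDistinct (b :: t)
  | _ => true

-- one row of B's outer loop: sort the values in 1..5, then scan neighbours
def rowNoDup (row : List Int) : Bool :=
  adjDistinct (PySem.List.sorted (row.filter (fun x => decide (1 ≤ x) && decide (x ≤ 5))) (fun x => x) false)

def check_rows_valid_alt (puzzle : List (List Int)) : Bool :=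
  (PySem.List.pyRange 0 5 1).all (fun i => rowNoDup (PySem.List.pyGetD puzzle i []))

-- ===== PRECONDITION & SPEC =====
-- A row with no value 1..5 repeated (the condition A tests per row), as a Bool.
def rowFineB (r : List Int) : Bool :=
  decide (List.count 1 r ≤ 1) && decide (List.count 2 r ≤ 1) && decide (List.count 3 r ≤ 1)
    && decide (List.count 4 r ≤ 1) && decide (List.count 5 r ≤ 1)

-- A indexes puzzle[0]..puzzle[4]; on fewer than 5 rows it returns (False) only if it breaks at a
-- duplicate-carrying row first, otherwise it raises IndexError (B raises identically there).
def Pre_check_rows_valid (puzzle : List (List Int)) : Prop :=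
  5 ≤ puzzle.length ∨ ∃ r ∈ puzzle, rowFineB r = false
instance (puzzle : List (List Int)) : Decidable (Pre_check_rows_valid puzzle) := by
  unfold Pre_check_rows_valid; infer_instance
def pvWitness_check_rows_valid : List (List Int) :=
  [[1, 2, 3], [0, 0, 4], [5], [], [2, 3]]

def Spec_check_rows_valid (puzzle : List (List Int)) (out : Bool) : Prop := out = check_rows_valid_alt puzzle
instance (puzzle : List (List Int)) (out : Bool) : Decidable (Spec_check_rows_valid puzzle out) := by unfold Spec_check_rows_valid; infer_instance

-- ===== CLAIM (what is proved, stated in full; the proofs are below) =====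
def Claim_equal_check_rows_valid : Prop := ∀ (puzzle : List (List Int)), Dom_check_rows_valid puzzle → Pre_check_rows_valid puzzle → Spec_check_rows_valid puzzle (check_rows_valid puzzle)

-- ===== LEMMAS AND PROOFS =====

-- the adjacent-pair scan accepts exactly the lists with no two equal neighbours
theorem adjDistinct_iff (l : List Int) :
    adjDistinct l = true ↔ List.IsChain (fun a b => a ≠ b) l := by
  match l with
  | [] => simp [adjDistinct]
  | [a] => simp [adjDistinct]
  | a :: b :: t =>
    rw [adjDistinct, List.isChain_cons_cons, ← adjDistinct_iff (b :: t)]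
    by_cases h : a = b <;> simp [h]

-- on a (≤)-sorted list, "no two neighbours equal" is exactly Nodup
theorem isChain_ne_iff_nodup (l : List Int) (h : l.Pairwise (fun a b => a ≤ b)) :
    List.IsChain (fun a b => a ≠ b) l ↔ l.Nodup := by
  constructor
  · intro hc
    have hlt : l.Pairwise (fun a b => a < b) := by
      induction l with
      | nil => simp
      | cons a t ih =>
        cases t with
        | nil => simp
        | cons b t' =>
          rw [List.isChain_cons_cons] at hc
          rw [List.pairwise_cons] at h ⊢
          have ht := ih h.2 hc.2
          refine ⟨?_, ht⟩
          intro x hx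
          rcases List.mem_cons.1 hx with rfl | hx'
          · exact lt_of_le_of_ne (h.1 x hx) hc.1
          · have hab : a < b := lt_of_le_of_ne (h.1 b (List.mem_cons_self)) hc.1
            have hbx : b ≤ x := (List.pairwise_cons.1 h.2).1 x hx'
            omega
    exact hlt.imp ne_of_lt
  · intro hn
    induction l with
    | nil => exact List.isChain_nil
    | cons a t ih =>
      cases t with
      | nil => exact List.isChain_singleton a
      | cons b t' =>
        rw [List.nodup_cons] at hn
        refine List.isChain_cons_cons.mpr ⟨?_, ih (List.Pairwise.sublist (by simp) h) hn.2⟩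
        intro hab
        exact hn.1 (hab ▸ List.mem_cons_self)

-- B's per-row test holds exactly on A's per-row condition
theorem rowNoDup_iff (row : List Int) : rowNoDup row = true ↔ rowFineB row = true := by
  have hperm : (PySem.List.sorted (row.filter (fun x => decide (1 ≤ x) && decide (x ≤ 5)))
        (fun x : Int => x) false).Perm (row.filter (fun x => decide (1 ≤ x) && decide (x ≤ 5))) :=
    PySem.List.sorted_perm _ _ _
  have hpw : (PySem.List.sorted (row.filter (fun x => decide (1 ≤ x) && decide (x ≤ 5)))
        (fun x : Int => x) false).Pairwise (fun a b => a ≤ b) :=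
    PySem.List.sorted_pairwise _ _
  rw [rowNoDup, adjDistinct_iff, isChain_ne_iff_nodup _ hpw, hperm.nodup_iff,
    List.nodup_iff_count_le_one]
  simp only [rowFineB, Bool.and_eq_true, decide_eq_true_eq, and_assoc]
  constructor
  · intro hcnt
    refine ⟨?_, ?_, ?_, ?_, ?_⟩
    · have := hcnt 1; rwa [List.count_filter (a := (1 : Int)) (by decide)] at this
    · have := hcnt 2; rwa [List.count_filter (a := (2 : Int)) (by decide)] at this
    · have := hcnt 3; rwa [List.count_filter (a := (3 : Int)) (by decide)] at this
    · have := hcnt 4; rwa [List.count_filter (a := (4 : Int)) (by decide)] at this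
    · have := hcnt 5; rwa [List.count_filter (a := (5 : Int)) (by decide)] at this
  · rintro ⟨h1', h2', h3', h4', h5'⟩ a
    by_cases hpa : (decide (1 ≤ a) && decide (a ≤ 5)) = true
    · rw [List.count_filter (a := a) hpa]
      have hb : 1 ≤ a ∧ a ≤ 5 := by simpa using hpa
      obtain ⟨hb1, hb2⟩ := hb
      interval_cases a <;> assumption
    · have hnm : a ∉ row.filter (fun x => decide (1 ≤ x) && decide (x ≤ 5)) :=
        fun hm => hpa (List.mem_filter.mp hm).2
      simp [List.count_eq_zero_of_not_mem hnm]

theorem rowNoDup_eq (row : List Int) : rowNoDup row = rowFineB row :=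
  Bool.eq_iff_iff.mpr (by rw [rowNoDup_iff])

-- A's five count tests on one row, as one decide against the continuation.
theorem chain_eq (row : List Int) (K : Bool) :
    (if PySem.List.count row 1 > 1 then false
      else if PySem.List.count row 2 > 1 then false
      else if PySem.List.count row 3 > 1 then false
      else if PySem.List.count row 4 > 1 then false
      else if PySem.List.count row 5 > 1 then false
      else K)
    = (rowFineB row && K) := by
  simp only [PySem.List.count_eq, rowFineB]
  split_ifs <;> simp_all

-- Loop invariant: on the rows not yet scanned, A's loop is the per-row condition, provided the scan
-- cannot run off the end (enough rows left, or a duplicate row ahead to break on).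
theorem loop_eq (puzzle : List (List Int)) :
    ∀ (fuel i : Nat), fuel + i = 5 →
      (5 ≤ puzzle.length ∨ ∃ r ∈ puzzle.drop i, rowFineB r = false) →
      check_rows_valid_loop puzzle fuel i
        = ((puzzle.drop i).take fuel).all rowFineB
  | 0, i, _, _ => by simp [check_rows_valid_loop]
  | fuel + 1, i, hfi, h => by
    have hi5 : i < 5 := by omega
    by_cases hlen : i < puzzle.length
    · have hdrop : puzzle.drop i = puzzle[i] :: puzzle.drop (i + 1) :=
        List.drop_eq_getElem_cons hlen
      have hget : PySem.List.pyGetD puzzle (i : Int) [] = puzzle[i] := by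
        rw [PySem.List.pyGetD_natCast]
        exact List.getD_eq_getElem puzzle [] hlen
      show (if i < 5 then _ else true) = _
      rw [if_pos hi5]
      simp only [hget, chain_eq]
      by_cases hok : rowFineB puzzle[i] = true
      · have h' : 5 ≤ puzzle.length ∨ ∃ r ∈ puzzle.drop (i + 1), rowFineB r = false := by
          rcases h with h5 | ⟨r, hr, hbad⟩
          · exact Or.inl h5
          · rw [hdrop] at hr
            rcases List.mem_cons.1 hr with hEq | hr
            · exact absurd hok (Bool.eq_false_iff.mp (hEq ▸ hbad))
            · exact Or.inr ⟨r, hr, hbad⟩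
        rw [loop_eq puzzle fuel (i + 1) (by omega) h',
          show List.take (fuel + 1) (List.drop i puzzle)
              = puzzle[i] :: List.take fuel (List.drop (i + 1) puzzle) from by
            rw [hdrop, List.take_succ_cons],
          List.all_cons]
      · rw [show List.take (fuel + 1) (List.drop i puzzle)
              = puzzle[i] :: List.take fuel (List.drop (i + 1) puzzle) from by
            rw [hdrop, List.take_succ_cons],
          List.all_cons]
        simp [Bool.eq_false_iff.mpr hok]
    · exfalso
      have : puzzle.drop i = [] := List.drop_eq_nil_of_le (by omega)
      rcases h with h5 | ⟨r, hr, _⟩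
      · omega
      · simp [this] at hr

-- B's range-indexed pass equals the take-5 pass, under Pre_
theorem alt_eq (puzzle : List (List Int)) (hpre : Pre_check_rows_valid puzzle) :
    check_rows_valid_alt puzzle = (puzzle.take 5).all rowFineB := by
  have hr5 : PySem.List.pyRange 0 5 1 = [0, 1, 2, 3, 4] := by decide
  rw [check_rows_valid_alt, hr5]
  simp only [List.all_cons, List.all_nil, rowNoDup_eq]
  rcases puzzle with _ | ⟨a, _ | ⟨b, _ | ⟨c, _ | ⟨d, _ | ⟨e, t⟩⟩⟩⟩⟩
  · rcases hpre with h5 | ⟨r, hr, hbad⟩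
    · simp at h5
    · simp at hr
  · rcases hpre with h5 | ⟨r, hr, hbad⟩
    · simp at h5
    · simp only [List.mem_singleton] at hr
      subst hr
      simp [PySem.List.pyGetD, PySem.List.pyGet?, PySem.List.pyIdx?, hbad]
  · rcases hpre with h5 | ⟨r, hr, hbad⟩
    · simp at h5
    · simp only [List.mem_cons] at hr
      rcases hr with rfl | rfl | hr
      · simp [PySem.List.pyGetD, PySem.List.pyGet?, PySem.List.pyIdx?, hbad]
      · simp [PySem.List.pyGetD, PySem.List.pyGet?, PySem.List.pyIdx?, hbad]
      · simp at hr
  · rcases hpre with h5 | ⟨r, hr, hbad⟩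
    · simp at h5
    · simp only [List.mem_cons] at hr
      rcases hr with rfl | rfl | rfl | hr
      · simp [PySem.List.pyGetD, PySem.List.pyGet?, PySem.List.pyIdx?, hbad]
      · simp [PySem.List.pyGetD, PySem.List.pyGet?, PySem.List.pyIdx?, hbad]
      · simp [PySem.List.pyGetD, PySem.List.pyGet?, PySem.List.pyIdx?, hbad]
      · simp at hr
  · rcases hpre with h5 | ⟨r, hr, hbad⟩
    · simp at h5
    · simp only [List.mem_cons] at hr
      rcases hr with rfl | rfl | rfl | rfl | hr
      · simp [PySem.List.pyGetD, PySem.List.pyGet?, PySem.List.pyIdx?, hbad]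
      · simp [PySem.List.pyGetD, PySem.List.pyGet?, PySem.List.pyIdx?, hbad]
      · simp [PySem.List.pyGetD, PySem.List.pyGet?, PySem.List.pyIdx?, hbad]
      · simp [PySem.List.pyGetD, PySem.List.pyGet?, PySem.List.pyIdx?, hbad]
      · simp at hr
  · have g0 : PySem.List.pyGetD (a :: b :: c :: d :: e :: t) (0 : Int) [] = a := by
      rw [show (0 : Int) = ((0 : Nat) : Int) from rfl, PySem.List.pyGetD_natCast]; rfl
    have g1 : PySem.List.pyGetD (a :: b :: c :: d :: e :: t) (1 : Int) [] = b := by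
      rw [show (1 : Int) = ((1 : Nat) : Int) from rfl, PySem.List.pyGetD_natCast]; rfl
    have g2 : PySem.List.pyGetD (a :: b :: c :: d :: e :: t) (2 : Int) [] = c := by
      rw [show (2 : Int) = ((2 : Nat) : Int) from rfl, PySem.List.pyGetD_natCast]; rfl
    have g3 : PySem.List.pyGetD (a :: b :: c :: d :: e :: t) (3 : Int) [] = d := by
      rw [show (3 : Int) = ((3 : Nat) : Int) from rfl, PySem.List.pyGetD_natCast]; rfl
    have g4 : PySem.List.pyGetD (a :: b :: c :: d :: e :: t) (4 : Int) [] = e := by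
      rw [show (4 : Int) = ((4 : Nat) : Int) from rfl, PySem.List.pyGetD_natCast]; rfl
    rw [g0, g1, g2, g3, g4]
    simp

theorem check_rows_valid_spec : Claim_equal_check_rows_valid := by
  intro puzzle _ hpre
  unfold Spec_check_rows_valid
  have h0 : check_rows_valid puzzle
      = (puzzle.take 5).all rowFineB := by
    have := loop_eq puzzle 5 0 (by omega) (by simpa using hpre)
    simpa [check_rows_valid] using this
  rw [h0, alt_eq puzzle hpre]
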